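-- pv_equiv track=rewrite | github.com/128technology/python-netconf-utilities | ote_utils/config_gen.py | _remove_exits_from_config
-- ===== SOURCE A (Python) =====
-- def _remove_exits_from_config(config, delimiter=None):
--     if not delimiter:
--         for line in config:
--             line = line.strip()
--             if line == "exit":
--                 delimiter = line[line.find("exit") + 4 :]
--                 break
--     return [line for line in config if line.strip() != "exit"], delimiter
-- ===== SOURCE B (Python) =====
-- def _remove_exits_from_config(config, delimiter=None):
--     result = []
--     for line in config:
--         s = line.strip()
--         if s == "exit":
--             if not delimiter:
--                 delimiter = s[s.find("exit") + 4:]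
--         else:
--             result.append(line)
--     return result, delimiter
-- ===== Notes on version B (the rewrite author's own statement) =====
-- stated objective: simpler
-- what changed: Replaces A's two traversals (a preliminary break-out scan for the delimiter plus a filtering comprehension) with a single loop that accumulates the kept lines and picks up the delimiter as it goes.
import Mathlib
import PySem

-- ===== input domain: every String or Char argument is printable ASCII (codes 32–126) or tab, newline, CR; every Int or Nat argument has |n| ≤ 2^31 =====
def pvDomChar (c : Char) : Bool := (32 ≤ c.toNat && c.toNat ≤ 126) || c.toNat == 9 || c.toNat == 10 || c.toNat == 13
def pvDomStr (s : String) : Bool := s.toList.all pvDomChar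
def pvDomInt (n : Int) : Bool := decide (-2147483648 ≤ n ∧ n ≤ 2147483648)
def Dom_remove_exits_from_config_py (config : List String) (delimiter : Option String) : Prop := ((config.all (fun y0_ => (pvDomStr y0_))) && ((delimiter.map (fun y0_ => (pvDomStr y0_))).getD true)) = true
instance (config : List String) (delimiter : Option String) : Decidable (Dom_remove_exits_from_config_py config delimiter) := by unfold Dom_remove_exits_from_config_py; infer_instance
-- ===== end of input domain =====

-- ===== PORT A =====
-- B fuses A's two passes (delimiter scan + filtering comprehension) into one accumulator loop; same return value.
-- Python truthiness of the Optional[str] delimiter: falsy iff None or "".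
def pvFalsy (d : Option String) : Bool :=
  match d with
  | none => true
  | some s => s = ""

-- the 'for line in config: … break' scan of A (returns the delimiter after the loop)
def pvA_scan : List String → Option String → Option String
  | [], d => d
  | line :: rest, d =>
      let line' := PySem.Str.strip line
      if line' = "exit" then
        some (PySem.Str.slice line' (some (PySem.Str.find line' "exit" + 4)) none)
      else pvA_scan rest d

def remove_exits_from_config_py (config : List String) (delimiter : Option String) : List String × Option String :=
  let d := if pvFalsy delimiter then pvA_scan config delimiter else delimiter
  (config.filter (fun line => !(PySem.Str.strip line = "exit")), d)

-- ===== PORT B =====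
def pvB_step (st : List String × Option String) (line : String) : List String × Option String :=
  let s := PySem.Str.strip line
  if s = "exit" then
    if pvFalsy st.2 then
      (st.1, some (PySem.Str.slice s (some (PySem.Str.find s "exit" + 4)) none))
    else st
  else (st.1 ++ [line], st.2)

def remove_exits_from_config_py_alt (config : List String) (delimiter : Option String) : List String × Option String :=
  config.foldl pvB_step ([], delimiter)

-- ===== PRECONDITION & SPEC =====
def Spec_remove_exits_from_config_py (config : List String) (delimiter : Option String) (out : List String × Option String) : Prop := out = remove_exits_from_config_py_alt config delimiter
instance (config : List String) (delimiter : Option String) (out : List String × Option String) : Decidable (Spec_remove_exits_from_config_py config delimiter out) := by unfold Spec_remove_exits_from_config_py; infer_instance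

-- ===== CLAIM (what is proved, stated in full; the proofs are below) =====
def Claim_equal_remove_exits_from_config_py : Prop := ∀ (config : List String) (delimiter : Option String), Dom_remove_exits_from_config_py config delimiter → Spec_remove_exits_from_config_py config delimiter (remove_exits_from_config_py config delimiter)

-- ===== LEMMAS AND PROOFS =====
-- once the delimiter has been set (to ""), A's scan would return it unchanged: rescanning with some "" yields some ""
theorem pvA_scan_some_empty (xs : List String) : pvA_scan xs (some "") = some "" := by
  induction xs with
  | nil => rfl
  | cons line rest ih =>
      simp only [pvA_scan]
      split
      · next h => rw [h]; rfl
      · exact ih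

-- loop invariant of B's single pass, phrased against A's two passes
theorem pvB_invariant (xs : List String) : ∀ (acc : List String) (d : Option String),
    xs.foldl pvB_step (acc, d)
      = (acc ++ xs.filter (fun line => !(PySem.Str.strip line = "exit")),
         if pvFalsy d then pvA_scan xs d else d) := by
  induction xs with
  | nil =>
      intro acc d
      by_cases hd : pvFalsy d = true <;> simp [pvA_scan, hd]
  | cons line rest ih =>
      intro acc d
      rw [List.foldl_cons]
      by_cases h : PySem.Str.strip line = "exit"
      · have hval : (some (PySem.Str.slice (PySem.Str.strip line)
            (some (PySem.Str.find (PySem.Str.strip line) "exit" + 4)) none) : Option String)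
            = some "" := by rw [h]; decide
        have hstep : pvB_step (acc, d) line = (acc, if pvFalsy d then some "" else d) := by
          simp only [pvB_step, if_pos h, hval]
          by_cases hd : pvFalsy d = true <;> simp [hd]
        have hscan : pvA_scan (line :: rest) d = some "" := by
          simp only [pvA_scan, if_pos h]; exact hval
        have hfilt : (line :: rest).filter (fun l => !(PySem.Str.strip l = "exit"))
            = rest.filter (fun l => !(PySem.Str.strip l = "exit")) := by
          simp [h]
        rw [hstep, hfilt, hscan]
        by_cases hd : pvFalsy d = true
        · rw [if_pos hd, ih]
          simp [pvFalsy, pvA_scan_some_empty]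
        · rw [if_neg hd, ih, if_neg hd]
      · have hstep : pvB_step (acc, d) line = (acc ++ [line], d) := by
          simp only [pvB_step, if_neg h]
        have hscan : pvA_scan (line :: rest) d = pvA_scan rest d := by
          simp only [pvA_scan, if_neg h]
        have hfilt : (line :: rest).filter (fun l => !(PySem.Str.strip l = "exit"))
            = line :: rest.filter (fun l => !(PySem.Str.strip l = "exit")) := by
          simp [h]
        rw [hstep, hfilt, hscan, ih]
        simp

-- ===== VERDICT (by name: the statement is the Claim_ definition above) =====
theorem remove_exits_from_config_py_spec : Claim_equal_remove_exits_from_config_py := by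
  intro config delimiter _
  unfold Spec_remove_exits_from_config_py remove_exits_from_config_py remove_exits_from_config_py_alt
  rw [pvB_invariant]
  simp
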